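-- pv_equiv track=rewrite | github.com/clover3/Chair | src/data_generator/bert_input_splitter.py | get_sep_loc
-- ===== SOURCE A (Python) =====
-- SEP_ID = 102
--
-- class SEPNotFound(IndexError):
--     pass
--
-- def get_sep_loc(input_ids):
--     idx_sep1 = None
--     for i in range(len(input_ids)):
--         if input_ids[i] == SEP_ID:
--             idx_sep1 = i
--             break
--     if idx_sep1 is None:
--         raise SEPNotFound()
--
--     idx_sep2 = None
--     for i in range(idx_sep1 + 1, len(input_ids)):
--         if input_ids[i] == SEP_ID:
--             idx_sep2 = i
--     if idx_sep2 is None: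
--         raise SEPNotFound()
--
--     return idx_sep1, idx_sep2
-- ===== SOURCE B (Python) =====
-- SEP_ID = 102
--
-- class SEPNotFound(IndexError):
--     pass
--
-- def get_sep_loc(input_ids):
--     indices = [i for i, v in enumerate(input_ids) if v == SEP_ID]
--     if len(indices) < 2:
--         raise SEPNotFound()
--     return indices[0], indices[-1]
-- ===== Notes on version B (the rewrite author's own statement) =====
-- stated objective: simpler
-- what changed: A's two explicit scans (forward-with-break for the first SEP, then a second forward scan for the last) are replaced by one enumerate pass that collects all SEP positions, a single len<2 check covering both of A's raises, and constant-time selection of the first and last entry.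
import Mathlib
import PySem

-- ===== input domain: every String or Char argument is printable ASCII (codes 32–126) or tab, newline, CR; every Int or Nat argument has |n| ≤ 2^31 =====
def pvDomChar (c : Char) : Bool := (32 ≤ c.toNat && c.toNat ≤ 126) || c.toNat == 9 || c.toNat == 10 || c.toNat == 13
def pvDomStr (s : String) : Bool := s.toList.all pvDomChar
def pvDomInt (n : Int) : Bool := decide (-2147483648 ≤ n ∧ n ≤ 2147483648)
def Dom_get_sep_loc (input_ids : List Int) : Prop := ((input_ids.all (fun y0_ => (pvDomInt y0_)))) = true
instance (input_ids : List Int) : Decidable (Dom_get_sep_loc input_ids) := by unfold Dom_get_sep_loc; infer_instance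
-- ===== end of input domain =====

-- B replaces A's two scans by one pass collecting all SEP positions plus endpoint selection (objective: simpler).

-- ===== PORT A =====
-- first loop: scan forward, break at the first SEP (index counter k)
def pvA_first : List Int → Nat → Option Nat
  | [], _ => none
  | x :: xs, k => if x = 102 then some k else pvA_first xs (k + 1)

-- second loop: scan the rest forward, remembering the LAST SEP seen (no break)
def pvA_last : List Int → Nat → Option Nat → Option Nat
  | [], _, acc => acc
  | x :: xs, k, acc => pvA_last xs (k + 1) (if x = 102 then some k else acc)

def get_sep_loc (input_ids : List Int) : Int × Int :=
  match pvA_first input_ids 0 with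
  | none => (0, 0)   -- SEPNotFound: excluded by Pre_
  | some i1 =>
    match pvA_last (input_ids.drop (i1 + 1)) (i1 + 1) none with
    | none => (0, 0) -- SEPNotFound: excluded by Pre_
    | some i2 => ((i1 : Int), (i2 : Int))

-- ===== PORT B =====
def get_sep_loc_alt (input_ids : List Int) : Int × Int :=
  let indices : List Int :=
    ((input_ids.zipIdx).filter (fun p => p.1 == 102)).map (fun p => (p.2 : Int))
  if indices.length < 2 then (0, 0)  -- SEPNotFound: excluded by Pre_
  else (indices.headD 0, (indices.getLast?).getD 0)

-- ===== PRECONDITION & SPEC =====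
-- Pre_ excludes exactly the inputs with fewer than two SEP (102) tokens, on which A raises SEPNotFound.
def Pre_get_sep_loc (input_ids : List Int) : Prop := 2 ≤ input_ids.count 102
instance (input_ids : List Int) : Decidable (Pre_get_sep_loc input_ids) := by unfold Pre_get_sep_loc; infer_instance
def pvWitness_get_sep_loc : List Int := [101, 102, 5, 102]

def Spec_get_sep_loc (input_ids : List Int) (out : Int × Int) : Prop := out = get_sep_loc_alt input_ids
instance (input_ids : List Int) (out : Int × Int) : Decidable (Spec_get_sep_loc input_ids out) := by unfold Spec_get_sep_loc; infer_instance

-- ===== CLAIM (what is proved, stated in full; the proofs are below) =====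
def Claim_equal_get_sep_loc : Prop := ∀ (input_ids : List Int), Dom_get_sep_loc input_ids → Pre_get_sep_loc input_ids → Spec_get_sep_loc input_ids (get_sep_loc input_ids)

-- ===== LEMMAS AND PROOFS =====

-- proof-side list of all SEP positions, with starting offset k
def pvIdxs : List Int → Nat → List Nat
  | [], _ => []
  | x :: xs, k => if x = 102 then k :: pvIdxs xs (k + 1) else pvIdxs xs (k + 1)

theorem pvA_first_eq (xs : List Int) : ∀ k, pvA_first xs k = (pvIdxs xs k).head? := by
  induction xs with
  | nil => intro k; rfl
  | cons x xs ih =>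
    intro k
    by_cases h : x = 102 <;> simp [pvA_first, pvIdxs, h, ih]

theorem getLast?_cons_or {α : Type} (a : α) (l : List α) :
    (a :: l).getLast? = (l.getLast?).or (some a) := by
  cases l with
  | nil => rfl
  | cons b t => simp [List.getLast?_cons_cons, Option.or]
                cases h : (b :: t).getLast? with
                | none => simp [List.getLast?_eq_none_iff] at h
                | some v => rfl

theorem pvA_last_eq (xs : List Int) : ∀ k acc, pvA_last xs k acc = ((pvIdxs xs k).getLast?).or acc := by
  induction xs with
  | nil => intro k acc; rfl
  | cons x xs ih =>
    intro k acc
    by_cases h : x = 102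
    · simp only [pvA_last, pvIdxs, h, ih, getLast?_cons_or, if_true]
      cases (pvIdxs xs (k + 1)).getLast? <;> rfl
    · simp [pvA_last, pvIdxs, h, ih]

theorem pvIdxs_drop (xs : List Int) : ∀ k i1 rest, pvIdxs xs k = i1 :: rest →
    k ≤ i1 ∧ pvIdxs (xs.drop (i1 + 1 - k)) (i1 + 1) = rest := by
  induction xs with
  | nil => intro k i1 rest h; simp [pvIdxs] at h
  | cons x xs ih =>
    intro k i1 rest h
    by_cases hx : x = 102
    · simp [pvIdxs, hx] at h
      obtain ⟨h1, h2⟩ := h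
      subst h1; subst h2
      refine ⟨le_refl _, ?_⟩
      simp
    · simp [pvIdxs, hx] at h
      obtain ⟨hle, hrest⟩ := ih (k + 1) i1 rest h
      refine ⟨by omega, ?_⟩
      have : i1 + 1 - k = (i1 + 1 - (k + 1)) + 1 := by omega
      rw [this, List.drop_succ_cons]
      exact hrest

theorem pvIdxs_length (xs : List Int) : ∀ k, (pvIdxs xs k).length = xs.count 102 := by
  induction xs with
  | nil => intro k; rfl
  | cons x xs ih =>
    intro k
    by_cases h : x = 102 <;> simp [pvIdxs, h, ih]

theorem pvB_indices (xs : List Int) : ∀ k,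
    ((xs.zipIdx k).filter (fun p => p.1 == 102)).map (fun p => (p.2 : Int))
      = (pvIdxs xs k).map (fun n : Nat => (n : Int)) := by
  induction xs with
  | nil => intro k; rfl
  | cons x xs ih =>
    intro k
    by_cases h : x = 102 <;> simp [List.zipIdx_cons, pvIdxs, h, ih]

-- ===== VERDICT (by name: the statement is the Claim_ definition above) =====
theorem get_sep_loc_spec : Claim_equal_get_sep_loc := by
  intro xs _ hpre
  unfold Spec_get_sep_loc Pre_get_sep_loc at *
  have hlen : 2 ≤ (pvIdxs xs 0).length := by rw [pvIdxs_length]; exact hpre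
  obtain ⟨i1, t, h0⟩ : ∃ i1 t, pvIdxs xs 0 = i1 :: t := by
    cases h : pvIdxs xs 0 with
    | nil => rw [h] at hlen; simp at hlen
    | cons a l => exact ⟨a, l, rfl⟩
  obtain ⟨i2, rest, ht⟩ : ∃ i2 rest, t = i2 :: rest := by
    cases h : t with
    | nil => rw [h0, h] at hlen; simp at hlen
    | cons a l => exact ⟨a, l, rfl⟩
  subst ht
  obtain ⟨-, hdrop⟩ := pvIdxs_drop xs 0 i1 (i2 :: rest) h0
  simp only [Nat.sub_zero] at hdrop
  -- A's value
  have hA : get_sep_loc xs = ((i1 : Int), (((i2 :: rest).getLast (List.cons_ne_nil _ _) : Nat) : Int)) := by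
    unfold get_sep_loc
    rw [pvA_first_eq, h0]
    simp only [List.head?_cons]
    rw [pvA_last_eq, hdrop]
    rw [List.getLast?_eq_some_getLast (l := _) (by simp)]
    simp [Option.or]
  -- B's value
  have hB : get_sep_loc_alt xs = ((i1 : Int), ((((i2 :: rest).getLast (List.cons_ne_nil _ _)) : Nat) : Int)) := by
    unfold get_sep_loc_alt
    simp only [pvB_indices, h0]
    rw [if_neg (by simp)]
    have hlast : ((i1 :: i2 :: rest).map (fun n : Nat => (n : Int))).getLast?
        = some ((((i1 :: i2 :: rest).getLast (List.cons_ne_nil _ _)) : Nat) : Int) := by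
      rw [List.getLast?_map, List.getLast?_eq_some_getLast (l := _) (List.cons_ne_nil _ _)]
      rfl
    rw [hlast]
    rw [List.getLast_cons (List.cons_ne_nil _ _)]
    simp
  rw [hA, hB]
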